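-- pv_equiv track=rewrite | github.com/harshita1611/leet_code | my-folder/3165-find-indices-with-index-and-value-difference-i/solution.py | findIndices
-- ===== SOURCE A (Python) =====
-- from typing import List
--
-- def findIndices(nums: List[int], indexDifference: int, valueDifference: int) -> List[int]:
--     ans=[]
--     n=len(nums)
--     for i in range(n):
--         for j in range(i,n):
--             if (abs(j-i)>=indexDifference and abs(nums[j]-nums[i])>=valueDifference):
--                 return [i,j]
--     return [-1,-1]
-- ===== SOURCE B (Python) =====
-- def findIndices(nums, indexDifference, valueDifference):
--     n = len(nums)
--     off = indexDifference if indexDifference > 0 else 0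
--     # ext[k] = (min(nums[k:]), max(nums[k:])) for k < n, built right-to-left
--     ext = [None] * (n + 1)
--     for k in range(n - 1, -1, -1):
--         v = nums[k]
--         if ext[k + 1] is None:
--             ext[k] = (v, v)
--         else:
--             lo, hi = ext[k + 1]
--             ext[k] = (v if v < lo else lo, v if v > hi else hi)
--     for i in range(n):
--         s = i + off
--         if s >= n:
--             break
--         lo, hi = ext[s]
--         if hi - nums[i] >= valueDifference or nums[i] - lo >= valueDifference:
--             for j in range(s, n):
--                 if abs(nums[j] - nums[i]) >= valueDifference:
--                     return [i, j]
--     return [-1, -1]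
-- ===== Notes on version B (the rewrite author's own statement) =====
-- stated objective: faster
-- what changed: Replaces the O(n^2) nested scan with suffix min/max extremes computed once, so each i is tested in O(1) and only one final O(n) window scan locates the first matching j.
import Mathlib
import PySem

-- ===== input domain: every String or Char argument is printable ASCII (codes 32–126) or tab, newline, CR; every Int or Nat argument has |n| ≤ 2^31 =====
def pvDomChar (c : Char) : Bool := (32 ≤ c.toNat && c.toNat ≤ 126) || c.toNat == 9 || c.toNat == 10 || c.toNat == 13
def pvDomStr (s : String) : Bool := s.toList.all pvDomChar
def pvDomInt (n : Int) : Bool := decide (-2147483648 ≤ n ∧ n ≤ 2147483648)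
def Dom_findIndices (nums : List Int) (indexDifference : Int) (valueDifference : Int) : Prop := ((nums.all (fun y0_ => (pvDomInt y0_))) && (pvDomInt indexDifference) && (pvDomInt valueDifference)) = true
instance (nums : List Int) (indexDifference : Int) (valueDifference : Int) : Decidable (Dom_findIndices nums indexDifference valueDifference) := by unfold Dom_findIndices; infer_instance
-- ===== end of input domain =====

-- B replaces A's nested scan with precomputed suffix min/max extremes; same return value everywhere.

-- ===== PORT A =====
def aInner (nums : List Int) (idiff vdiff i : Int) : List Int → Option Int
  | [] => none
  | j :: js =>
    if idiff ≤ |j - i| ∧ vdiff ≤ |PySem.List.pyGetD nums j 0 - PySem.List.pyGetD nums i 0| then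
      some j
    else aInner nums idiff vdiff i js

def aOuter (nums : List Int) (idiff vdiff n : Int) : List Int → List Int
  | [] => [-1, -1]
  | i :: is =>
    match aInner nums idiff vdiff i (PySem.List.pyRange i n 1) with
    | some j => [i, j]
    | none => aOuter nums idiff vdiff n is

def findIndices (nums : List Int) (indexDifference : Int) (valueDifference : Int) : List Int :=
  let n := PySem.List.len nums
  aOuter nums indexDifference valueDifference n (PySem.List.pyRange 0 n 1)

-- ===== PORT B =====
-- suffix extremes: (sufExt l) has length l.length+1; entry k is (min, max) of l.drop k, none for the empty suffix
def sufExt : List Int → List (Option (Int × Int))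
  | [] => [none]
  | v :: rest =>
    let e := sufExt rest
    (match e.head? with
     | none => some (v, v)            -- unreachable: sufExt is never empty
     | some none => some (v, v)
     | some (some (lo, hi)) => some ((if v < lo then v else lo), (if hi < v then v else hi))) :: e

def bInner (nums : List Int) (vdiff i : Int) : List Int → Option Int
  | [] => none
  | j :: js =>
    if vdiff ≤ |PySem.List.pyGetD nums j 0 - PySem.List.pyGetD nums i 0| then some j
    else bInner nums vdiff i js

def bOuter (nums : List Int) (vdiff off n : Int) (ext : List (Option (Int × Int))) : List Int → List Int
  | [] => [-1, -1]
  | i :: is =>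
    let s := i + off
    if n ≤ s then [-1, -1]            -- break: windows only shrink from here on
    else
      match PySem.List.pyGetD ext s none with
      | none => bOuter nums vdiff off n ext is
      | some (lo, hi) =>
        if vdiff ≤ (hi - PySem.List.pyGetD nums i 0) ∨ vdiff ≤ (PySem.List.pyGetD nums i 0 - lo) then
          match bInner nums vdiff i (PySem.List.pyRange s n 1) with
          | some j => [i, j]
          | none => bOuter nums vdiff off n ext is
        else bOuter nums vdiff off n ext is

def findIndices_alt (nums : List Int) (indexDifference : Int) (valueDifference : Int) : List Int :=
  let n := PySem.List.len nums
  let off := if 0 < indexDifference then indexDifference else 0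
  bOuter nums valueDifference off n (sufExt nums) (PySem.List.pyRange 0 n 1)

-- ===== PRECONDITION & SPEC =====
def Spec_findIndices (nums : List Int) (indexDifference : Int) (valueDifference : Int) (out : List Int) : Prop := out = findIndices_alt nums indexDifference valueDifference
instance (nums : List Int) (indexDifference : Int) (valueDifference : Int) (out : List Int) : Decidable (Spec_findIndices nums indexDifference valueDifference out) := by unfold Spec_findIndices; infer_instance

-- ===== CLAIM (what is proved, stated in full; the proofs are below) =====
def Claim_equal_findIndices : Prop := ∀ (nums : List Int) (indexDifference : Int) (valueDifference : Int), Dom_findIndices nums indexDifference valueDifference → Spec_findIndices nums indexDifference valueDifference (findIndices nums indexDifference valueDifference)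

-- ===== LEMMAS AND PROOFS =====

-- proof-side mirror of the suffix-extreme combine step
def extOf : List Int → Option (Int × Int)
  | [] => none
  | v :: rest =>
    match extOf rest with
    | none => some (v, v)
    | some (lo, hi) => some ((if v < lo then v else lo), (if hi < v then v else hi))

lemma sufExt_head? (l : List Int) : (sufExt l).head? = some (extOf l) := by
  induction l with
  | nil => rfl
  | cons v rest ih =>
    simp only [sufExt, List.head?_cons]
    rw [ih]
    cases he : extOf rest with
    | none => simp [extOf, he]
    | some p => obtain ⟨lo, hi⟩ := p; simp [extOf, he]

lemma sufExt_length (l : List Int) : (sufExt l).length = l.length + 1 := by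
  induction l with
  | nil => rfl
  | cons v rest ih => simp [sufExt, ih]

lemma sufExt_getD (l : List Int) (k : Nat) : (sufExt l).getD k none = extOf (l.drop k) := by
  induction l generalizing k with
  | nil => cases k <;> simp [sufExt, extOf]
  | cons v rest ih =>
    cases k with
    | zero =>
      simp only [sufExt, List.getD_cons_zero, List.drop_zero]
      rw [sufExt_head? rest]
      cases he : extOf rest with
      | none => simp [extOf, he]
      | some p => obtain ⟨lo, hi⟩ := p; simp [extOf, he]
    | succ k =>
      rw [List.drop_succ_cons, ← ih k]
      simp only [sufExt, List.getD_cons_succ]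

lemma extOf_spec (l : List Int) (lo hi : Int) (h : extOf l = some (lo, hi)) :
    lo ∈ l ∧ hi ∈ l ∧ ∀ x ∈ l, lo ≤ x ∧ x ≤ hi := by
  induction l generalizing lo hi with
  | nil => simp [extOf] at h
  | cons v rest ih =>
    cases he : extOf rest with
    | none =>
      have hrest : rest = [] := by
        cases rest with
        | nil => rfl
        | cons w ws => cases hw : extOf ws <;> simp [extOf, hw] at he
      subst hrest
      simp [extOf] at h
      obtain ⟨h1, h2⟩ := h
      subst h1; subst h2
      simp
    | some p =>
      obtain ⟨lo', hi'⟩ := p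
      obtain ⟨hm1, hm2, hb⟩ := ih lo' hi' he
      simp only [extOf, he, Option.some.injEq, Prod.mk.injEq] at h
      obtain ⟨h1, h2⟩ := h
      refine ⟨?_, ?_, ?_⟩
      · by_cases hv : v < lo'
        · simp only [hv, if_true] at h1; subst h1; exact List.mem_cons_self
        · simp only [hv, if_false] at h1; subst h1; exact List.mem_cons_of_mem _ hm1
      · by_cases hv : hi' < v
        · simp only [hv, if_true] at h2; subst h2; exact List.mem_cons_self
        · simp only [hv, if_false] at h2; subst h2; exact List.mem_cons_of_mem _ hm2
      · intro x hx
        rcases List.mem_cons.mp hx with rfl | hx'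
        · split_ifs at h1 h2 <;> omega
        · have := hb x hx'
          split_ifs at h1 h2 <;> omega

lemma extOf_iff (l : List Int) (lo hi x vd : Int) (h : extOf l = some (lo, hi)) :
    (vd ≤ hi - x ∨ vd ≤ x - lo) ↔ ∃ w ∈ l, vd ≤ |w - x| := by
  obtain ⟨hlo, hhi, hb⟩ := extOf_spec l lo hi h
  constructor
  · rintro (hc | hc)
    · exact ⟨hi, hhi, le_trans hc (le_abs_self _)⟩
    · refine ⟨lo, hlo, ?_⟩
      have h2 : x - lo ≤ |lo - x| := by
        rw [abs_sub_comm]; exact le_abs_self (x - lo)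
      omega
  · rintro ⟨w, hw, hc⟩
    obtain ⟨h1, h2⟩ := hb w hw
    rcases abs_cases (w - x) with ⟨he, _⟩ | ⟨he, _⟩ <;> omega

lemma bInner_eq_none_iff (nums : List Int) (vd i : Int) (js : List Int) :
    bInner nums vd i js = none ↔
      ∀ j ∈ js, ¬ vd ≤ |PySem.List.pyGetD nums j 0 - PySem.List.pyGetD nums i 0| := by
  induction js with
  | nil => simp [bInner]
  | cons j js ih =>
    by_cases hc : vd ≤ |PySem.List.pyGetD nums j 0 - PySem.List.pyGetD nums i 0|
    · simp [bInner, hc]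
    · simp only [bInner, if_neg hc, ih]
      constructor
      · intro hall j' hj'
        rcases List.mem_cons.mp hj' with rfl | hj''
        · exact hc
        · exact hall j' hj''
      · intro hall j' hj'
        exact hall j' (List.mem_cons_of_mem _ hj')

lemma aInner_congr (nums : List Int) (idiff vd i : Int) (js : List Int)
    (h : ∀ j ∈ js, idiff ≤ |j - i|) :
    aInner nums idiff vd i js = bInner nums vd i js := by
  induction js with
  | nil => rfl
  | cons j js ih =>
    have hj := h j List.mem_cons_self
    simp only [aInner, bInner, hj, true_and]
    split
    · rfl
    · exact ih (fun j' hj' => h j' (List.mem_cons_of_mem _ hj'))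

lemma aInner_none (nums : List Int) (idiff vd i : Int) (js : List Int)
    (h : ∀ j ∈ js, ¬ idiff ≤ |j - i|) :
    aInner nums idiff vd i js = none := by
  induction js with
  | nil => rfl
  | cons j js ih =>
    have hj := h j List.mem_cons_self
    simp only [aInner]
    rw [if_neg (by tauto)]
    exact ih (fun j' hj' => h j' (List.mem_cons_of_mem _ hj'))

lemma aInner_append (nums : List Int) (idiff vd i : Int) (l1 l2 : List Int) :
    aInner nums idiff vd i (l1 ++ l2) =
      match aInner nums idiff vd i l1 with
      | some j => some j
      | none => aInner nums idiff vd i l2 := by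
  induction l1 with
  | nil => simp [aInner]
  | cons j js ih =>
    simp only [List.cons_append, aInner]
    split <;> simp [ih]

lemma inner_eq (nums : List Int) (idiff vd i : Int) :
    aInner nums idiff vd i (PySem.List.pyRange i (nums.length : Int) 1) =
      bInner nums vd i
        (PySem.List.pyRange (i + (if 0 < idiff then idiff else 0)) (nums.length : Int) 1) := by
  by_cases hid : 0 < idiff
  · simp only [if_pos hid]
    by_cases hs : (nums.length : Int) ≤ i + idiff
    · rw [PySem.List.pyRange_one_eq_nil hs]
      rw [aInner_none nums idiff vd i _ ?_]
      · rfl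
      · intro j hj
        rw [PySem.List.mem_pyRange_one] at hj
        rw [abs_of_nonneg (by omega)]
        omega
    · rw [PySem.List.pyRange_one_append i (i + idiff) (nums.length : Int) (by omega) (by omega)]
      rw [aInner_append]
      rw [aInner_none nums idiff vd i (PySem.List.pyRange i (i + idiff) 1) ?_]
      · exact aInner_congr nums idiff vd i _ (fun j hj => by
          rw [PySem.List.mem_pyRange_one] at hj
          rw [abs_of_nonneg (by omega)]; omega)
      · intro j hj
        rw [PySem.List.mem_pyRange_one] at hj
        rw [abs_of_nonneg (by omega)]
        omega
  · simp only [if_neg hid, add_zero]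
    exact aInner_congr nums idiff vd i _ (fun j hj => by
      rw [PySem.List.mem_pyRange_one] at hj
      rw [abs_of_nonneg (by omega)]; omega)

lemma exists_window (nums : List Int) (s vd x : Int) (hs : 0 ≤ s) :
    (∃ j ∈ PySem.List.pyRange s (nums.length : Int) 1, vd ≤ |PySem.List.pyGetD nums j 0 - x|) ↔
      ∃ w ∈ nums.drop s.toNat, vd ≤ |w - x| := by
  rw [← PySem.List.map_pyGetD_pyRange' nums 0 hs]
  constructor
  · rintro ⟨j, hj, hc⟩; exact ⟨_, List.mem_map_of_mem hj, hc⟩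
  · rintro ⟨w, hw, hc⟩
    obtain ⟨j, hj, rfl⟩ := List.mem_map.mp hw
    exact ⟨j, hj, hc⟩

lemma aOuter_default (nums : List Int) (idiff vd n : Int) (l : List Int)
    (h : ∀ i ∈ l, aInner nums idiff vd i (PySem.List.pyRange i n 1) = none) :
    aOuter nums idiff vd n l = [-1, -1] := by
  induction l with
  | nil => rfl
  | cons i is ih =>
    simp only [aOuter, h i List.mem_cons_self]
    exact ih (fun i' hi' => h i' (List.mem_cons_of_mem _ hi'))

lemma outer_eq (nums : List Int) (idiff vd : Int) (l : List Int)
    (hnn : ∀ x ∈ l, 0 ≤ x) (hsorted : l.Pairwise (· ≤ ·)) :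
    aOuter nums idiff vd (nums.length : Int) l =
      bOuter nums vd (if 0 < idiff then idiff else 0) (nums.length : Int) (sufExt nums) l := by
  induction l with
  | nil => rfl
  | cons i is ih =>
    have hnn' : ∀ x ∈ is, 0 ≤ x := fun x hx => hnn x (List.mem_cons_of_mem _ hx)
    obtain ⟨hhead, htail⟩ := List.pairwise_cons.mp hsorted
    have hi0 : 0 ≤ i := hnn i List.mem_cons_self
    have hoff0 : 0 ≤ (if 0 < idiff then idiff else 0 : Int) := by split <;> omega
    by_cases hs : (nums.length : Int) ≤ i + (if 0 < idiff then idiff else 0)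
    · rw [show bOuter nums vd (if 0 < idiff then idiff else 0) (nums.length : Int) (sufExt nums) (i :: is) = [-1, -1] from by
        simp [bOuter, hs]]
      apply aOuter_default
      intro i' hi'
      have hii' : i ≤ i' := by
        rcases List.mem_cons.mp hi' with rfl | hmem
        · exact le_refl _
        · exact hhead i' hmem
      rw [inner_eq nums idiff vd i']
      rw [PySem.List.pyRange_one_eq_nil (by omega)]
      rfl
    · -- window nonempty for this i
      have hs0 : 0 ≤ i + (if 0 < idiff then idiff else 0) := by omega
      have hslt : i + (if 0 < idiff then idiff else 0) < (nums.length : Int) := by omega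
      have hklt : (i + (if 0 < idiff then idiff else 0)).toNat < nums.length := by omega
      obtain ⟨lo, hi', hext⟩ : ∃ lo hi',
          extOf (nums.drop (i + (if 0 < idiff then idiff else 0)).toNat) = some (lo, hi') := by
        cases hd : nums.drop (i + (if 0 < idiff then idiff else 0)).toNat with
        | nil =>
          exfalso
          have := congrArg List.length hd
          simp [List.length_drop] at this
          omega
        | cons w ws =>
          cases hw : extOf ws with
          | none => exact ⟨w, w, by simp [extOf, hw]⟩
          | some p =>
            obtain ⟨a, b⟩ := p
            exact ⟨(if w < a then w else a), (if b < w then w else b), by simp [extOf, hw]⟩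
      have hget : PySem.List.pyGetD (sufExt nums) (i + (if 0 < idiff then idiff else 0)) none
          = some (lo, hi') := by
        have hk : (i + (if 0 < idiff then idiff else 0)).toNat < (sufExt nums).length := by
          rw [sufExt_length]; omega
        rw [PySem.List.pyGetD_eq_getElem _ none hs0 (by rw [sufExt_length]; push_cast; omega)]
        rw [← List.getD_eq_getElem (sufExt nums) none hk]
        rw [sufExt_getD, hext]
      have hb : bOuter nums vd (if 0 < idiff then idiff else 0) (nums.length : Int) (sufExt nums) (i :: is) =
          (if vd ≤ (hi' - PySem.List.pyGetD nums i 0) ∨ vd ≤ (PySem.List.pyGetD nums i 0 - lo) then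
            match bInner nums vd i (PySem.List.pyRange (i + (if 0 < idiff then idiff else 0)) (nums.length : Int) 1) with
            | some j => [i, j]
            | none => bOuter nums vd (if 0 < idiff then idiff else 0) (nums.length : Int) (sufExt nums) is
          else bOuter nums vd (if 0 < idiff then idiff else 0) (nums.length : Int) (sufExt nums) is) := by
        simp only [bOuter, if_neg hs, hget]
      have hexiff :
          (vd ≤ (hi' - PySem.List.pyGetD nums i 0) ∨ vd ≤ (PySem.List.pyGetD nums i 0 - lo)) ↔
            ∃ j ∈ PySem.List.pyRange (i + (if 0 < idiff then idiff else 0)) (nums.length : Int) 1,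
              vd ≤ |PySem.List.pyGetD nums j 0 - PySem.List.pyGetD nums i 0| := by
        rw [extOf_iff _ lo hi' (PySem.List.pyGetD nums i 0) vd hext]
        exact (exists_window nums _ vd _ hs0).symm
      rw [hb]
      by_cases hc : vd ≤ (hi' - PySem.List.pyGetD nums i 0) ∨ vd ≤ (PySem.List.pyGetD nums i 0 - lo)
      · rw [if_pos hc]
        have hex := hexiff.mp hc
        cases hbi : bInner nums vd i (PySem.List.pyRange (i + (if 0 < idiff then idiff else 0)) (nums.length : Int) 1) with
        | none =>
          exfalso
          obtain ⟨j, hj, hcc⟩ := hex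
          exact (bInner_eq_none_iff nums vd i _).mp hbi j hj hcc
        | some j =>
          simp only [aOuter, inner_eq nums idiff vd i, hbi]
      · rw [if_neg hc]
        have hnone : bInner nums vd i (PySem.List.pyRange (i + (if 0 < idiff then idiff else 0)) (nums.length : Int) 1) = none := by
          rw [bInner_eq_none_iff]
          intro j hj hcc
          exact hc (hexiff.mpr ⟨j, hj, hcc⟩)
        simp only [aOuter, inner_eq nums idiff vd i, hnone]
        exact ih hnn' htail

-- ===== VERDICT (by name: the statement is the Claim_ definition above) =====
theorem findIndices_spec : Claim_equal_findIndices := by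
  intro nums idiff vd _
  unfold Spec_findIndices findIndices findIndices_alt
  simp only [PySem.List.len_eq]
  exact outer_eq nums idiff vd _
    (fun x hx => ((PySem.List.mem_pyRange_one).mp hx).1)
    ((PySem.List.pairwise_lt_pyRange_one 0 (nums.length : Int)).imp le_of_lt)
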